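-- pv_equiv track=rewrite | github.com/LeonYe612/WFGameAI | wfgame-ai-server/apps/ocr/services/gitlab.py | _is_lfs_pointer
-- ===== SOURCE A (Python) =====
-- def _is_lfs_pointer(content: str) -> bool:
--     """
--     检查内容是否为 Git LFS 指针文件
--
--     Args:
--         content: 文件内容
--
--     Returns:
--         是否为 LFS 指针文件
--     """
--     lines = content.strip().split("\n")
--     if len(lines) >= 3:
--         return (
--             lines[0].startswith("version https://git-lfs.github.com/spec/v1")
--             and any(line.startswith("oid sha256:") for line in lines)
--             and any(line.startswith("size ") for line in lines)
--         )
--     return False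
-- ===== SOURCE B (Python) =====
-- def _is_lfs_pointer(content: str) -> bool:
--     s = content.strip()
--     if s.count("\n") < 2:
--         return False
--     return (
--         s.startswith("version https://git-lfs.github.com/spec/v1")
--         and "\noid sha256:" in s
--         and "\nsize " in s
--     )
-- ===== Notes on version B (the rewrite author's own statement) =====
-- stated objective: alternative
-- what changed: B never splits the content into lines: it counts newlines for the >=3-line guard and decides the three conditions by plain substring tests on the stripped string ('version...' prefix, and occurrences of '\noid sha256:' and '\nsize '), which is correct because under the mandatory version prefix any matching line other than the first must sit right after a newline.
import Mathlib
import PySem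

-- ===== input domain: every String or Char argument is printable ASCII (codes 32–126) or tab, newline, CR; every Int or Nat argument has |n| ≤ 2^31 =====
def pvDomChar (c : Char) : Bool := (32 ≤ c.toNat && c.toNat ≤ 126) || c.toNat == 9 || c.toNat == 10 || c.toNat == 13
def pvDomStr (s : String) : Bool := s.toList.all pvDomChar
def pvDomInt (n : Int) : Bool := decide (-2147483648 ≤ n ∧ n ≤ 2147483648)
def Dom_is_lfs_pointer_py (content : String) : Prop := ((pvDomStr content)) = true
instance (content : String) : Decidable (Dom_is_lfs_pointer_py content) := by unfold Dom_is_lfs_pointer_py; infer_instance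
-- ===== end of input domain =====

-- B decides LFS-pointer-ness by newline counting and substring tests on the stripped string, never building the line list (alternative decomposition, same cost).


-- ===== PORT A =====
def is_lfs_pointer_py (content : String) : Bool :=
  let lines := (PySem.Str.split? (PySem.Str.strip content) "\n").getD []  -- split? is `some` here (sep ≠ "")
  if lines.length ≥ 3 then
    PySem.Str.startswith (lines.headD "") "version https://git-lfs.github.com/spec/v1"
      && lines.any (fun line => PySem.Str.startswith line "oid sha256:")
      && lines.any (fun line => PySem.Str.startswith line "size ")
  else false

-- ===== PORT B =====
def is_lfs_pointer_py_alt (content : String) : Bool :=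
  let s := PySem.Str.strip content
  if PySem.Str.count s "\n" < 2 then false
  else
    PySem.Str.startswith s "version https://git-lfs.github.com/spec/v1"
      && PySem.Str.isIn "\noid sha256:" s
      && PySem.Str.isIn "\nsize " s

-- ===== PRECONDITION & SPEC =====
def Spec_is_lfs_pointer_py (content : String) (out : Bool) : Prop := out = is_lfs_pointer_py_alt content
instance (content : String) (out : Bool) : Decidable (Spec_is_lfs_pointer_py content out) := by unfold Spec_is_lfs_pointer_py; infer_instance

-- ===== CLAIM (what is proved, stated in full; the proofs are below) =====
def Claim_equal_is_lfs_pointer_py : Prop := ∀ (content : String), Dom_is_lfs_pointer_py content → Spec_is_lfs_pointer_py content (is_lfs_pointer_py content)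

-- ===== LEMMAS AND PROOFS =====

-- reference splitter: Python's str.split("\n") on a char list, by simple cons recursion
def splitNL : List Char → List (List Char)
  | [] => [[]]
  | c :: r =>
    if c = '\n' then [] :: splitNL r
    else
      match splitNL r with
      | [] => [[c]]
      | h :: t => (c :: h) :: t

theorem splitNL_ne_nil (t : List Char) : splitNL t ≠ [] := by
  cases t with
  | nil => simp [splitNL]
  | cons c r =>
    simp only [splitNL]
    split_ifs
    · simp
    · cases splitNL r <;> simp

theorem splitNL_nl (r : List Char) : splitNL ('\n' :: r) = [] :: splitNL r := by
  simp [splitNL]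

theorem splitNL_ch {c : Char} (hc : c ≠ '\n') (r : List Char) {h : List Char}
    {t' : List (List Char)} (e : splitNL r = h :: t') :
    splitNL (c :: r) = (c :: h) :: t' := by
  simp [splitNL, hc, e]

theorem splitNL_length (t : List Char) :
    (splitNL t).length = t.count '\n' + 1 := by
  induction t with
  | nil => simp [splitNL]
  | cons c r ih =>
    by_cases hc : c = '\n'
    · subst hc; simp [splitNL_nl, ih]
    · obtain ⟨h, t', e⟩ := List.exists_cons_of_ne_nil (splitNL_ne_nil r)
      rw [splitNL_ch hc r e]
      rw [e] at ih
      simp only [List.length_cons] at ih ⊢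
      simp [hc, ih]

theorem splitOn_go_eq (l : List Char) :
    ∀ (fuel : Nat) (cur : List Char) (acc : List (List Char)), l.length ≤ fuel →
      PySem.Chars.splitOn.go ['\n'] fuel l cur acc
        = acc.reverse ++ (cur.reverse ++ (splitNL l).headD []) :: (splitNL l).tail := by
  induction l with
  | nil =>
    intro fuel cur acc _
    cases fuel <;> (rw [PySem.Chars.splitOn.go.eq_def]; simp [splitNL])
  | cons c r ih =>
    intro fuel cur acc hf
    cases fuel with
    | zero => simp at hf
    | succ fuel =>
      by_cases hc : c = '\n'
      · subst hc
        rw [show PySem.Chars.splitOn.go ['\n'] (fuel+1) ('\n' :: r) cur acc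
              = PySem.Chars.splitOn.go ['\n'] fuel r [] (cur.reverse :: acc) by
            rw [PySem.Chars.splitOn.go.eq_def]; simp [List.isPrefixOf]]
        rw [ih fuel [] (cur.reverse :: acc) (by simp only [List.length_cons] at hf; omega)]
        obtain ⟨h, t', e⟩ := List.exists_cons_of_ne_nil (splitNL_ne_nil r)
        rw [splitNL_nl, e]
        simp
      · have hpre : (['\n'].isPrefixOf (c :: r)) = false := by
          simp [List.isPrefixOf]
          exact fun h => hc h.symm
        rw [show PySem.Chars.splitOn.go ['\n'] (fuel+1) (c :: r) cur acc
              = PySem.Chars.splitOn.go ['\n'] fuel r (c :: cur) acc by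
            rw [PySem.Chars.splitOn.go.eq_def]; simp [hpre]]
        rw [ih fuel (c :: cur) acc (by simp only [List.length_cons] at hf; omega)]
        obtain ⟨h, t', e⟩ := List.exists_cons_of_ne_nil (splitNL_ne_nil r)
        rw [splitNL_ch hc r e, e]
        simp

theorem splitOn_nl_eq (t : List Char) : PySem.Chars.splitOn t ['\n'] = splitNL t := by
  unfold PySem.Chars.splitOn
  rw [splitOn_go_eq t (t.length + 1) [] [] (by omega)]
  obtain ⟨h, t', e⟩ := List.exists_cons_of_ne_nil (splitNL_ne_nil t)
  simp [e]

theorem count_go_eq (l : List Char) :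
    ∀ (fuel : Nat) (acc : Nat), l.length ≤ fuel →
      PySem.Chars.count.go ['\n'] fuel l acc = acc + l.count '\n' := by
  induction l with
  | nil => intro fuel acc _; cases fuel <;> (rw [PySem.Chars.count.go.eq_def]; simp)
  | cons c r ih =>
    intro fuel acc hf
    cases fuel with
    | zero => simp at hf
    | succ fuel =>
      by_cases hc : c = '\n'
      · subst hc
        rw [show PySem.Chars.count.go ['\n'] (fuel+1) ('\n' :: r) acc
              = PySem.Chars.count.go ['\n'] fuel r (acc + 1) by
            rw [PySem.Chars.count.go.eq_def]; simp [List.isPrefixOf]]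
        rw [ih fuel (acc + 1) (by simp only [List.length_cons] at hf; omega)]
        simp; omega
      · have hpre : (['\n'].isPrefixOf (c :: r)) = false := by
          simp [List.isPrefixOf]
          exact fun h => hc h.symm
        rw [show PySem.Chars.count.go ['\n'] (fuel+1) (c :: r) acc
              = PySem.Chars.count.go ['\n'] fuel r acc by
            rw [PySem.Chars.count.go.eq_def]; simp [hpre]]
        rw [ih fuel acc (by simp only [List.length_cons] at hf; omega)]
        simp [hc]

theorem count_nl_eq (t : List Char) : PySem.Chars.count t ['\n'] = t.count '\n' := by
  unfold PySem.Chars.count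
  simp [List.isEmpty, count_go_eq t t.length 0 (le_refl _)]

-- the first piece of splitNL t admits exactly the newline-free prefixes of t
theorem head_prefix_iff {p : List Char} (t : List Char) (hp : '\n' ∉ p) :
    p <+: (splitNL t).headD [] ↔ p <+: t := by
  induction t generalizing p with
  | nil => simp [splitNL]
  | cons c r ih =>
    by_cases hc : c = '\n'
    · subst hc
      rw [splitNL_nl]
      cases p with
      | nil => simp
      | cons a p' =>
        have ha : a ≠ '\n' := by rintro rfl; exact hp List.mem_cons_self
        simp [List.cons_prefix_cons, ha]
    · obtain ⟨h, t', e⟩ := List.exists_cons_of_ne_nil (splitNL_ne_nil r)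
      rw [splitNL_ch hc r e]
      cases p with
      | nil => simp
      | cons a p' =>
        have hp' : '\n' ∉ p' := fun hm => hp (List.mem_cons_of_mem a hm)
        have := ih (p := p') hp'
        rw [e] at this
        simp only [List.headD_cons] at this ⊢
        simp [List.cons_prefix_cons, this]

theorem tail_any_iff {p : List Char} (hp : '\n' ∉ p) (t : List Char) :
    ((splitNL t).tail.any (fun l => PySem.Chars.startswith l p)) = true ↔ ('\n' :: p) <:+: t := by
  induction t with
  | nil => simp [splitNL, List.infix_nil]
  | cons c r ih =>
    by_cases hc : c = '\n'
    · subst hc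
      obtain ⟨h, t', e⟩ := List.exists_cons_of_ne_nil (splitNL_ne_nil r)
      rw [splitNL_nl, List.tail_cons, e, List.any_cons, Bool.or_eq_true]
      have hhead : (PySem.Chars.startswith h p = true) ↔ p <+: r := by
        rw [PySem.Chars.startswith_iff]
        have := head_prefix_iff (p := p) r hp
        rw [e] at this
        simpa using this
      rw [e] at ih
      constructor
      · rintro (h1 | h2)
        · rw [List.infix_cons_iff]
          exact Or.inl (List.cons_prefix_cons.mpr ⟨rfl, hhead.mp h1⟩)
        · exact (List.infix_cons_iff).mpr (Or.inr (ih.mp h2))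
      · intro hin
        rcases (List.infix_cons_iff).mp hin with h1 | h2
        · exact Or.inl (hhead.mpr (List.cons_prefix_cons.mp h1).2)
        · exact Or.inr (ih.mpr h2)
    · obtain ⟨h, t', e⟩ := List.exists_cons_of_ne_nil (splitNL_ne_nil r)
      rw [splitNL_ch hc r e, List.tail_cons]
      rw [e] at ih
      rw [List.tail_cons] at ih
      rw [ih, List.infix_cons_iff]
      constructor
      · exact Or.inr
      · rintro (h1 | h2)
        · exact absurd (List.cons_prefix_cons.mp h1).1.symm hc
        · exact h2

theorem any_startswith_eq {p : List Char} (hp : '\n' ∉ p) (t : List Char) :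
    ((splitNL t).any (fun l => PySem.Chars.startswith l p))
      = (PySem.Chars.startswith t p || PySem.Chars.isIn ('\n' :: p) t) := by
  obtain ⟨h, t', e⟩ := List.exists_cons_of_ne_nil (splitNL_ne_nil t)
  rw [Bool.eq_iff_iff]
  have hhead : (PySem.Chars.startswith h p = true) ↔ p <+: t := by
    rw [PySem.Chars.startswith_iff]
    have := head_prefix_iff (p := p) t hp
    rw [e] at this
    simpa using this
  have htail := tail_any_iff hp t
  rw [e] at htail
  rw [List.tail_cons] at htail
  rw [e, List.any_cons, Bool.or_eq_true, Bool.or_eq_true, hhead, htail,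
    PySem.Chars.startswith_iff, PySem.Chars.isIn_iff_infix]

theorem startswith_head_eq {p : List Char} (hp : '\n' ∉ p) (t : List Char) :
    PySem.Chars.startswith ((splitNL t).headD []) p = PySem.Chars.startswith t p := by
  rw [Bool.eq_iff_iff, PySem.Chars.startswith_iff, PySem.Chars.startswith_iff]
  exact head_prefix_iff t hp

theorem startswith_ne_head {a b : Char} (hab : a ≠ b) {p q t : List Char}
    (h : PySem.Chars.startswith t (a :: p) = true) :
    PySem.Chars.startswith t (b :: q) = false := by
  rw [PySem.Chars.startswith_iff] at h
  cases t with
  | nil => simp [List.prefix_nil] at h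
  | cons c r =>
    rw [List.cons_prefix_cons] at h
    rw [Bool.eq_false_iff]
    intro hb
    rw [PySem.Chars.startswith_iff, List.cons_prefix_cons] at hb
    exact hab (h.1.trans hb.1.symm)

theorem toList_headD_map (L : List (List Char)) (hL : L ≠ []) :
    ((L.map String.ofList).headD "").toList = L.headD [] := by
  cases L with
  | nil => exact absurd rfl hL
  | cons h t => simp

theorem count_nl_eq' (t : List Char) : PySem.Chars.count t ("\n".toList) = t.count '\n' := by
  rw [show ("\n".toList) = ['\n'] by decide]
  exact count_nl_eq t

-- the whole equivalence on the char level, for the stripped character list t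
theorem char_main (t : List Char) :
    (if (splitNL t).length ≥ 3 then
        PySem.Chars.startswith ((splitNL t).headD []) ("version https://git-lfs.github.com/spec/v1".toList)
          && (splitNL t).any (fun l => PySem.Chars.startswith l ("oid sha256:".toList))
          && (splitNL t).any (fun l => PySem.Chars.startswith l ("size ".toList))
      else false)
    = (if t.count '\n' < 2 then false
       else
        PySem.Chars.startswith t ("version https://git-lfs.github.com/spec/v1".toList)
          && PySem.Chars.isIn ("\noid sha256:".toList) t
          && PySem.Chars.isIn ("\nsize ".toList) t) := by
  have hV : '\n' ∉ "version https://git-lfs.github.com/spec/v1".toList := by decide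
  have hO : '\n' ∉ "oid sha256:".toList := by decide
  have hS : '\n' ∉ "size ".toList := by decide
  rw [show ("\noid sha256:".toList) = '\n' :: ("oid sha256:".toList) by decide]
  rw [show ("\nsize ".toList) = '\n' :: ("size ".toList) by decide]
  rw [splitNL_length, startswith_head_eq hV, any_startswith_eq hO, any_startswith_eq hS]
  by_cases hg : t.count '\n' + 1 ≥ 3
  · rw [if_pos hg, if_neg (by omega : ¬ t.count '\n' < 2)]
    by_cases hv : PySem.Chars.startswith t ("version https://git-lfs.github.com/spec/v1".toList) = true
    · have ho : PySem.Chars.startswith t ("oid sha256:".toList) = false := by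
        have := startswith_ne_head (by decide : 'v' ≠ 'o')
          (p := "ersion https://git-lfs.github.com/spec/v1".toList) (q := "id sha256:".toList) (t := t)
        exact this hv
      have hs : PySem.Chars.startswith t ("size ".toList) = false := by
        have := startswith_ne_head (by decide : 'v' ≠ 's')
          (p := "ersion https://git-lfs.github.com/spec/v1".toList) (q := "ize ".toList) (t := t)
        exact this hv
      rw [ho, hs, hv]
      simp
    · rw [Bool.not_eq_true] at hv
      rw [hv]
      simp
  · rw [if_neg hg, if_pos (by omega : t.count '\n' < 2)]

-- ===== VERDICT (by name: the statement is the Claim_ definition above) =====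
theorem is_lfs_pointer_py_spec : Claim_equal_is_lfs_pointer_py := by
  intro content _
  unfold Spec_is_lfs_pointer_py is_lfs_pointer_py is_lfs_pointer_py_alt
  have hsplit : PySem.Str.split? (PySem.Str.strip content) "\n"
      = some ((splitNL (PySem.Str.strip content).toList).map String.ofList) := by
    rw [PySem.Str.split?.eq_1]
    simp [PySem.Chars.split?, List.isEmpty, splitOn_nl_eq]
  rw [hsplit]
  simp only [Option.getD_some, List.length_map]
  simp only [PySem.Str.startswith_eq, PySem.Str.isIn_eq, PySem.Str.count_eq]
  rw [toList_headD_map _ (splitNL_ne_nil _)]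
  simp only [List.any_map, Function.comp_def, String.toList_ofList, count_nl_eq']
  exact char_main (PySem.Str.strip content).toList
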